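-- pv_equiv track=rewrite | github.com/phucvan44/Recommendation-System | clearn_data/main.py | parse_genre
-- ===== SOURCE A (Python) =====
-- def parse_genre(genre):
--     genre = genre.split("|")
--     genres = []
--     for strings in genre:
--         strings = strings.split(" ")
--         for string in strings:
--             string = "".join(e for e in string if e.isalnum())
--             if len(string) >= 2:genres.append(string)
--     return genres
-- ===== SOURCE B (Python) =====
-- def parse_genre(genre):
--     # One-pass scan: no splitting; flush the alnum-filtered buffer at '|' or ' '.
--     genres = []
--     cur = []
--     for ch in genre:
--         if ch == '|' or ch == ' ':
--             if len(cur) >= 2: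
--                 genres.append(''.join(cur))
--             cur = []
--         elif ch.isalnum():
--             cur.append(ch)
--     if len(cur) >= 2:
--         genres.append(''.join(cur))
--     return genres
-- ===== Notes on version B (the rewrite author's own statement) =====
-- stated objective: simpler
-- what changed: Replaced the nested pipe-split/space-split loops with a single character scan that keeps an alnum-filtered buffer and flushes it at either delimiter character.
import Mathlib
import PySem

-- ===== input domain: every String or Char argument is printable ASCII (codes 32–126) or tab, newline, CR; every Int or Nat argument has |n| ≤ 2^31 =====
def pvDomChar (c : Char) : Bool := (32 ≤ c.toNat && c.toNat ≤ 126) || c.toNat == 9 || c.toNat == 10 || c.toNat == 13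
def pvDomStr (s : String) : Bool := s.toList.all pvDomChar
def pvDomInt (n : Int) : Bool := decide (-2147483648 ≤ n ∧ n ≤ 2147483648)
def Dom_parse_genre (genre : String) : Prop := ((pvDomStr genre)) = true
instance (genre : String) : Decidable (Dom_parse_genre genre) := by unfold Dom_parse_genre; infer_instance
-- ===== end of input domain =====

-- B replaces A's nested split('|')/split(' ') loops by a single character scan
-- with an alnum-filtered buffer flushed at either delimiter (objective: simpler).

-- ===== PORT A =====
def parse_genre (genre : String) : List String :=
  (PySem.Chars.splitOn genre.toList ['|']).foldl (fun genres strings =>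
    (PySem.Chars.splitOn strings [' ']).foldl (fun genres string =>
      let string := string.filter PySem.Chars.isalnum
      if 2 ≤ string.length then genres ++ [String.ofList string] else genres) genres) []

-- ===== PORT B =====
def pgFlush (acc : List String) (cur : List Char) : List String :=
  if 2 ≤ cur.length then acc ++ [String.ofList cur] else acc

def parse_genre_alt (genre : String) : List String :=
  let st := genre.toList.foldl
    (fun (st : List String × List Char) ch =>
      if ch = '|' ∨ ch = ' ' then (pgFlush st.1 st.2, [])
      else if PySem.Chars.isalnum ch then (st.1, st.2 ++ [ch])
      else st)
    ([], [])
  pgFlush st.1 st.2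

-- ===== PRECONDITION & SPEC =====
def Spec_parse_genre (genre : String) (out : List String) : Prop := out = parse_genre_alt genre
instance (genre : String) (out : List String) : Decidable (Spec_parse_genre genre out) := by unfold Spec_parse_genre; infer_instance

-- ===== CLAIM (what is proved, stated in full; the proofs are below) =====
def Claim_equal_parse_genre : Prop := ∀ (genre : String), Dom_parse_genre genre → Spec_parse_genre genre (parse_genre genre)

-- ===== LEMMAS AND PROOFS =====

-- one token's contribution
def pgTok (t : List Char) : List String :=
  if 2 ≤ (t.filter PySem.Chars.isalnum).length then [String.ofList (t.filter PySem.Chars.isalnum)] else []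

def pgDelim (c : Char) : Bool := c == '|' || c == ' '

-- PySem's fuelled splitOn on a single-char separator is Mathlib's splitOnP
theorem pg_go_spec (c : Char) (fuel : Nat) (l cur : List Char) (acc : List (List Char))
    (h : l.length ≤ fuel) :
    PySem.Chars.splitOn.go [c] fuel l cur acc
      = acc.reverse ++ List.modifyHead (cur.reverse ++ ·) (List.splitOnP (· == c) l) := by
  induction fuel generalizing l cur acc with
  | zero =>
    have : l = [] := List.eq_nil_of_length_eq_zero (Nat.le_zero.mp h)
    subst this
    simp [PySem.Chars.splitOn.go, List.splitOnP_nil]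
  | succ f ih =>
    cases l with
    | nil => simp [PySem.Chars.splitOn.go, List.splitOnP_nil]
    | cons x rest =>
      simp only [PySem.Chars.splitOn.go]
      by_cases hx : x = c
      · subst hx
        rw [if_pos (by simp [List.isPrefixOf])]
        rw [ih _ _ _ (by simpa using Nat.le_of_succ_le_succ h)]
        have hm : ∀ (L : List (List Char)),
            List.modifyHead (fun z => ([] : List Char).reverse ++ z) L = L := by
          intro L; cases L <;> rfl
        rw [hm, List.splitOnP_cons, if_pos (by simp)]
        simp [List.reverse_cons, List.modifyHead_cons]
      · rw [if_neg (by simp [List.isPrefixOf, Ne.symm hx])]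
        rw [ih _ _ _ (by simpa using Nat.le_of_succ_le_succ h)]
        simp only [List.splitOnP_cons, hx, beq_iff_eq, if_false,
          List.modifyHead_modifyHead]
        have : ((fun z => cur.reverse ++ z) ∘ List.cons x)
            = fun z => (x :: cur).reverse ++ z := by
          funext z; simp
        rw [this]

theorem pg_splitOn_single (c : Char) (cs : List Char) :
    PySem.Chars.splitOn cs [c] = List.splitOnP (· == c) cs := by
  unfold PySem.Chars.splitOn
  rw [pg_go_spec c (cs.length + 1) cs [] [] (Nat.le_succ _)]
  cases h : List.splitOnP (· == c) cs with
  | nil => exact absurd h (List.splitOnP_ne_nil _ _)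
  | cons a t => simp

-- splitting on '|' then on ' ' is splitting on either delimiter
theorem pg_split_both (cs : List Char) :
    ((List.splitOnP (· == '|') cs).map (List.splitOnP (· == ' '))).flatten
      = List.splitOnP pgDelim cs := by
  induction cs with
  | nil => simp [List.splitOnP_nil]
  | cons x rest ih =>
    by_cases h1 : x = '|'
    · subst h1
      simp [List.splitOnP_cons, pgDelim, List.splitOnP_nil, ih]
    · by_cases h2 : x = ' '
      · subst h2
        simp only [List.splitOnP_cons, pgDelim]
        rw [if_neg (by simp), if_pos (by simp)]
        obtain ⟨a, t, ht⟩ : ∃ a t, List.splitOnP (· == '|') rest = a :: t := by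
          cases hh : List.splitOnP (· == '|') rest with
          | nil => exact absurd hh (List.splitOnP_ne_nil _ _)
          | cons a t => exact ⟨a, t, rfl⟩
        rw [ht]
        simp only [List.modifyHead, List.map_cons, List.flatten_cons,
          List.splitOnP_cons]
        rw [if_pos (by simp)]
        rw [← ih, ht]
        simp
      · simp only [List.splitOnP_cons, pgDelim]
        rw [if_neg (by simp [h1]), if_neg (by simp [h1, h2])]
        obtain ⟨a, t, ht⟩ : ∃ a t, List.splitOnP (· == '|') rest = a :: t := by
          cases hh : List.splitOnP (· == '|') rest with
          | nil => exact absurd hh (List.splitOnP_ne_nil _ _)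
          | cons a t => exact ⟨a, t, rfl⟩
        rw [ht]
        simp only [List.modifyHead, List.map_cons, List.flatten_cons,
          List.splitOnP_cons]
        rw [if_neg (by simp [h2])]
        obtain ⟨b, u, hu⟩ : ∃ b u, List.splitOnP (· == ' ') a = b :: u := by
          cases hh : List.splitOnP (· == ' ') a with
          | nil => exact absurd hh (List.splitOnP_ne_nil _ _)
          | cons b u => exact ⟨b, u, rfl⟩
        rw [hu]
        rw [← ih, ht]
        simp [hu]

-- A's inner loop over one part
theorem pg_inner (p : List Char) (acc : List String) :
    (PySem.Chars.splitOn p [' ']).foldl (fun genres string =>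
      let string := string.filter PySem.Chars.isalnum
      if 2 ≤ string.length then genres ++ [String.ofList string] else genres) acc
    = acc ++ (List.splitOnP (· == ' ') p).flatMap pgTok := by
  rw [pg_splitOn_single]
  induction List.splitOnP (· == ' ') p generalizing acc with
  | nil => simp
  | cons t ts ih =>
    simp only [List.foldl_cons, List.flatMap_cons]
    rw [ih]
    unfold pgTok
    split_ifs <;> simp

-- A's outer loop
theorem pg_outer (parts : List (List Char)) (acc : List String) :
    parts.foldl (fun genres strings =>
      (PySem.Chars.splitOn strings [' ']).foldl (fun genres string =>
        let string := string.filter PySem.Chars.isalnum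
        if 2 ≤ string.length then genres ++ [String.ofList string] else genres) genres) acc
    = acc ++ ((parts.map (List.splitOnP (· == ' '))).flatten).flatMap pgTok := by
  induction parts generalizing acc with
  | nil => simp
  | cons q qs ih =>
    simp only [List.foldl_cons, List.map_cons, List.flatten_cons, List.flatMap_append]
    rw [pg_inner, ih]
    simp

-- A computes the flat per-token contribution over tokens split on both delimiters
theorem pg_A_char (genre : String) :
    parse_genre genre = (List.splitOnP pgDelim genre.toList).flatMap pgTok := by
  unfold parse_genre
  rw [pg_splitOn_single, pg_outer, pg_split_both]
  simp

-- filtering through a non-alnum, non-delimiter char is invisible to pgTok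
theorem pg_tok_skip (t z : List Char) (c : Char) (ha : PySem.Chars.isalnum c = false) :
    pgTok (t ++ c :: z) = pgTok (t ++ z) := by
  unfold pgTok
  simp [List.filter_append, ha]

theorem pg_B_char (cs : List Char) (acc : List String) (t : List Char) :
    (pgFlush
      ((cs.foldl (fun (st : List String × List Char) ch =>
        if ch = '|' ∨ ch = ' ' then (pgFlush st.1 st.2, [])
        else if PySem.Chars.isalnum ch then (st.1, st.2 ++ [ch])
        else st) (acc, t.filter PySem.Chars.isalnum)).1)
      ((cs.foldl (fun (st : List String × List Char) ch =>
        if ch = '|' ∨ ch = ' ' then (pgFlush st.1 st.2, [])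
        else if PySem.Chars.isalnum ch then (st.1, st.2 ++ [ch])
        else st) (acc, t.filter PySem.Chars.isalnum)).2))
    = acc ++ (List.modifyHead (t ++ ·) (List.splitOnP pgDelim cs)).flatMap pgTok := by
  induction cs generalizing acc t with
  | nil =>
    simp only [List.foldl_nil, List.splitOnP_nil, List.modifyHead, List.append_nil,
      List.flatMap_cons, List.flatMap_nil, List.append_nil]
    unfold pgFlush pgTok
    split_ifs <;> simp
  | cons c rest ih =>
    by_cases hd : c = '|' ∨ c = ' '
    · simp only [List.foldl_cons, if_pos hd]
      have hflt : (([] : List Char)).filter PySem.Chars.isalnum = [] := rfl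
      have := ih (pgFlush acc (t.filter PySem.Chars.isalnum)) []
      rw [hflt] at this
      rw [this]
      have hpd : pgDelim c = true := by
        rcases hd with h | h <;> simp [pgDelim, h]
      simp only [List.splitOnP_cons, hpd, if_pos rfl, List.modifyHead]
      have : pgFlush acc (t.filter PySem.Chars.isalnum) = acc ++ pgTok t := by
        unfold pgFlush pgTok; split_ifs <;> simp
      rw [this]
      cases hq : List.splitOnP pgDelim rest with
      | nil => exact absurd hq (List.splitOnP_ne_nil _ _)
      | cons a u => simp
    · have hpd : pgDelim c = false := by
        simp only [pgDelim]
        have h1 : ¬ c = '|' := fun h => hd (Or.inl h)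
        have h2 : ¬ c = ' ' := fun h => hd (Or.inr h)
        simp [h1, h2]
      by_cases ha : PySem.Chars.isalnum c = true
      · simp only [List.foldl_cons, if_neg hd, if_pos ha]
        have hf : t.filter PySem.Chars.isalnum ++ [c]
            = (t ++ [c]).filter PySem.Chars.isalnum := by
          simp [List.filter_append, ha]
        rw [hf, ih acc (t ++ [c])]
        simp only [List.splitOnP_cons, hpd, Bool.false_eq_true, if_false,
          List.modifyHead_modifyHead]
        congr 2
        · congr 1
          funext z
          simp
      · simp only [List.foldl_cons, if_neg hd, if_neg ha]
        rw [ih acc t]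
        simp only [List.splitOnP_cons, hpd, Bool.false_eq_true, if_false,
          List.modifyHead_modifyHead]
        congr 1
        obtain ⟨a, u, hu⟩ : ∃ a u, List.splitOnP pgDelim rest = a :: u := by
          cases hh : List.splitOnP pgDelim rest with
          | nil => exact absurd hh (List.splitOnP_ne_nil _ _)
          | cons a u => exact ⟨a, u, rfl⟩
        rw [hu]
        simp only [List.modifyHead, Function.comp, List.flatMap_cons]
        rw [pg_tok_skip t a c (by simpa using ha)]

-- ===== VERDICT (by name: the statement is the Claim_ definition above) =====
theorem parse_genre_spec : Claim_equal_parse_genre := by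
  intro genre _
  unfold Spec_parse_genre
  rw [pg_A_char]
  unfold parse_genre_alt
  have := pg_B_char genre.toList [] []
  simp only [List.filter_nil] at this
  rw [this]
  cases hq : List.splitOnP pgDelim genre.toList with
  | nil => exact absurd hq (List.splitOnP_ne_nil _ _)
  | cons a u => simp
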